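-- pv_equiv track=rewrite | github.com/jih189/grasping_analysis | manipulation/grip/ffregrasp.py | getSideOfAngleRange
-- ===== SOURCE A (Python) =====
-- def getSideOfAngleRange(mask):
--     firstOfAngleRange = None
--     endOfAngleRange = None
--     isloop = False
--     for i in range(len(mask)):
--         if mask[i]:
--             if i == len(mask) - 1 and endOfAngleRange == None:
--                 endOfAngleRange = i
--                 if firstOfAngleRange == None:
--                     firstOfAngleRange = i
--             elif endOfAngleRange != None and not isloop:
--                 firstOfAngleRange = i
--                 isloop = True
--             elif firstOfAngleRange == None:
--                 firstOfAngleRange = i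
--         elif firstOfAngleRange != None and endOfAngleRange == None:
--             endOfAngleRange = i - 1
--     return firstOfAngleRange, endOfAngleRange
-- ===== SOURCE B (Python) =====
-- def getSideOfAngleRange(mask):
--     # Build the table of maximal contiguous True runs, then combine by index.
--     runs = []
--     start = None
--     for i, v in enumerate(mask):
--         if v:
--             if start is None:
--                 start = i
--         elif start is not None:
--             runs.append((start, i - 1))
--             start = None
--     if start is not None:
--         runs.append((start, len(mask) - 1))
--     if not runs:
--         return None, None
--     if len(runs) == 1:
--         return runs[0]
--     return runs[1][0], runs[0][1]
-- ===== Notes on version B (the rewrite author's own statement) =====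
-- stated objective: alternative
-- what changed: Replaces A's flag-driven state machine (first/end/isloop sentinels with a last-index special case) by an explicit run table: one scan collects the (start,end) pairs of maximal True runs, then a short indexed combine returns (None,None), runs[0], or (runs[1].start, runs[0].end).
import Mathlib
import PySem

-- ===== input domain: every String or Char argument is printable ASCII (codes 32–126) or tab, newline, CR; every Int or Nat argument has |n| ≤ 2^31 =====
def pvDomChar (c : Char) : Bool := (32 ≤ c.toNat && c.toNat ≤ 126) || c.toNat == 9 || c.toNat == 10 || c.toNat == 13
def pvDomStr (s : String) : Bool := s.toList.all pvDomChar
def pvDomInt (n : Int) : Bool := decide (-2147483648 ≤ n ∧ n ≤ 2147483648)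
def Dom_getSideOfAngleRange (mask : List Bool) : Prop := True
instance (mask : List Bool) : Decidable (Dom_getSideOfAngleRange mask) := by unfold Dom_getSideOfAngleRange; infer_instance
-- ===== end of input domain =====

-- B replaces A's flag state machine with an explicit run table plus an indexed combine; same O(n), different decomposition.

-- ===== PORT A =====
-- loop body of A (first, end, isloop), branch for branch; `last` stands for len(mask)-1, `b` for mask[i]
def stepA (last : Int) (s : Option Int × Option Int × Bool) (i : Int) (b : Bool) :
    Option Int × Option Int × Bool :=
  if b then
    if i == last && s.2.1 == none then
      (if s.1 == none then some i else s.1, some i, s.2.2)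
    else if s.2.1 != none && !s.2.2 then
      (some i, s.2.1, true)
    else if s.1 == none then
      (some i, s.2.1, s.2.2)
    else s
  else if s.1 != none && s.2.1 == none then
    (s.1, some (i - 1), s.2.2)
  else s

def getSideOfAngleRange (mask : List Bool) : Option Int × Option Int :=
  let r := (PySem.List.pyRange 0 (mask.length : Int) 1).foldl
    (fun s i => stepA ((mask.length : Int) - 1) s i (PySem.List.pyGetD mask i false))
    (none, none, false)
  (r.1, r.2.1)

-- ===== PORT B =====
-- loop body of B: state (runs, start)
def stepB (s : List (Int × Int) × Option Int) (i : Int) (b : Bool) :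
    List (Int × Int) × Option Int :=
  if b then
    (s.1, if s.2 == none then some i else s.2)
  else
    match s.2 with
    | some st0 => (s.1 ++ [(st0, i - 1)], none)
    | none => s

-- final flush of an open run (uses len(mask)-1) and the indexed combine of Source B
def flushB (last : Int) (s : List (Int × Int) × Option Int) : List (Int × Int) :=
  match s.2 with
  | some st0 => s.1 ++ [(st0, last)]
  | none => s.1

def combineRuns : List (Int × Int) → Option Int × Option Int
  | [] => (none, none)
  | [r] => (some r.1, some r.2)
  | r0 :: r1 :: _ => (some r1.1, some r0.2)

def getSideOfAngleRange_alt (mask : List Bool) : Option Int × Option Int :=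
  let st := (PySem.List.enumerate mask).foldl (fun s p => stepB s p.1 p.2) ([], none)
  combineRuns (flushB ((mask.length : Int) - 1) st)

-- ===== PRECONDITION & SPEC =====
def Spec_getSideOfAngleRange (mask : List Bool) (out : Option Int × Option Int) : Prop := out = getSideOfAngleRange_alt mask
instance (mask : List Bool) (out : Option Int × Option Int) : Decidable (Spec_getSideOfAngleRange mask out) := by unfold Spec_getSideOfAngleRange; infer_instance

-- ===== CLAIM (what is proved, stated in full; the proofs are below) =====
def Claim_equal_getSideOfAngleRange : Prop := ∀ (mask : List Bool), Dom_getSideOfAngleRange mask → Spec_getSideOfAngleRange mask (getSideOfAngleRange mask)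

-- ===== LEMMAS AND PROOFS =====

-- recursive presentations of the two folds
def goA (last : Int) : List Bool → Int → (Option Int × Option Int × Bool) → (Option Int × Option Int × Bool)
  | [], _, s => s
  | b :: rs, i, s => goA last rs (i + 1) (stepA last s i b)

def goB : List Bool → Int → (List (Int × Int) × Option Int) → (List (Int × Int) × Option Int)
  | [], _, s => s
  | b :: rs, i, s => goB rs (i + 1) (stepB s i b)

def outA (last : Int) (rest : List Bool) (i : Int) (s : Option Int × Option Int × Bool) :
    Option Int × Option Int :=
  let r := goA last rest i s
  (r.1, r.2.1)

def outB (last : Int) (rest : List Bool) (i : Int) (s : List (Int × Int) × Option Int) :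
    Option Int × Option Int :=
  combineRuns (flushB last (goB rest i s))

theorem foldlA_eq_goA (last : Int) (rest : List Bool) (i : Int) (s : Option Int × Option Int × Bool) :
    (PySem.List.enumerate rest i).foldl (fun s p => stepA last s p.1 p.2) s = goA last rest i s := by
  induction rest generalizing i s with
  | nil => simp [PySem.List.enumerate_nil, goA]
  | cons b rs ih => simp [PySem.List.enumerate_cons, goA, ih]

theorem foldlB_eq_goB (rest : List Bool) (i : Int) (s : List (Int × Int) × Option Int) :
    (PySem.List.enumerate rest i).foldl (fun s p => stepB s p.1 p.2) s = goB rest i s := by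
  induction rest generalizing i s with
  | nil => simp [PySem.List.enumerate_nil, goB]
  | cons b rs ih => simp [PySem.List.enumerate_cons, goB, ih]

-- state L3: second run already started and closed; A is frozen, B only grows runs past index 1
theorem lem3 (rest : List Bool) (i last : Int) (r1 r2 : Int × Int)
    (tail : List (Int × Int)) (start : Option Int) :
    outA last rest i (some r2.1, some r1.2, true) = outB last rest i (r1 :: r2 :: tail, start) := by
  induction rest generalizing i tail start with
  | nil =>
      cases start <;> simp [outA, outB, goA, goB, flushB, combineRuns]
  | cons b rs ih =>
      cases b with
      | true =>
          simp only [outA, outB, goA, goB, stepA, stepB]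
          simp only [Bool.and_false, if_true, Bool.not_true]
          cases start <;> simp <;> exact ih _ _ _
      | false =>
          simp only [outA, outB, goA, goB, stepA, stepB]
          cases start with
          | none => simpa using ih (i + 1) tail none
          | some s0 =>
              simpa [List.cons_append] using ih (i + 1) (tail ++ [(s0, i - 1)]) none

-- state L3open: second run open; A frozen at (start of run 2, end of run 1)
theorem lem3open (rest : List Bool) (i last f1 e1 f2 : Int) :
    outA last rest i (some f2, some e1, true) = outB last rest i ([(f1, e1)], some f2) := by
  induction rest generalizing i with
  | nil => simp [outA, outB, goA, goB, flushB, combineRuns]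
  | cons b rs ih =>
      cases b with
      | true =>
          simpa [outA, outB, goA, goB, stepA, stepB] using ih (i + 1)
      | false =>
          simpa [outA, outB, goA, goB, stepA, stepB] using
            lem3 rs (i + 1) last (f1, e1) (f2, i - 1) [] none

-- state L2: first run closed, no second run yet
theorem lem2 (rest : List Bool) (i last f e : Int) :
    outA last rest i (some f, some e, false) = outB last rest i ([(f, e)], none) := by
  induction rest generalizing i with
  | nil => simp [outA, outB, goA, goB, flushB, combineRuns]
  | cons b rs ih =>
      cases b with
      | true =>
          simpa [outA, outB, goA, goB, stepA, stepB] using lem3open rs (i + 1) last f e i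
      | false =>
          simpa [outA, outB, goA, goB, stepA, stepB] using ih (i + 1)

-- state L1: inside the first run (A's end sentinel still None); needs the index bookkeeping
theorem lem1 (rest : List Bool) (i last f : Int)
    (hne : rest ≠ []) (hlen : i + rest.length = last + 1) :
    outA last rest i (some f, none, false) = outB last rest i ([], some f) := by
  induction rest generalizing i with
  | nil => exact absurd rfl hne
  | cons b rs ih =>
      cases b with
      | true =>
          cases rs with
          | nil =>
              have hi : i = last := by simp at hlen; omega
              subst hi
              simp [outA, outB, goA, goB, stepA, stepB, flushB, combineRuns]
          | cons b' rs' =>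
              have hi : ¬ (i = last) := by simp at hlen ⊢; omega
              have h1 : i + 1 + (b' :: rs').length = last + 1 := by
                simp at hlen ⊢; omega
              simpa [outA, outB, goA, goB, stepA, stepB, hi] using
                ih (i + 1) (by simp) h1
      | false =>
          simpa [outA, outB, goA, goB, stepA, stepB] using lem2 rs (i + 1) last f (i - 1)

-- state L0: nothing seen yet
theorem lem0 (rest : List Bool) (i last : Int)
    (hlen : i + rest.length = last + 1) :
    outA last rest i (none, none, false) = outB last rest i ([], none) := by
  induction rest generalizing i with
  | nil => simp [outA, outB, goA, goB, flushB, combineRuns]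
  | cons b rs ih =>
      cases b with
      | true =>
          cases rs with
          | nil =>
              have hi : i = last := by simp at hlen; omega
              subst hi
              simp [outA, outB, goA, goB, stepA, stepB, flushB, combineRuns]
          | cons b' rs' =>
              have hi : ¬ (i = last) := by simp at hlen ⊢; omega
              have h1 : i + 1 + (b' :: rs').length = last + 1 := by
                simp at hlen ⊢; omega
              simpa [outA, outB, goA, goB, stepA, stepB, hi] using
                lem1 (b' :: rs') (i + 1) last i (by simp) h1
      | false =>
          have h1 : i + 1 + rs.length = last + 1 := by simp at hlen ⊢; omega
          simpa [outA, outB, goA, goB, stepA, stepB] using ih (i + 1) h1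

theorem portA_eq_outA (mask : List Bool) :
    getSideOfAngleRange mask = outA ((mask.length : Int) - 1) mask 0 (none, none, false) := by
  have hmap := PySem.List.enumerate_eq_map_pyRange mask false
  unfold getSideOfAngleRange outA
  rw [← foldlA_eq_goA ((mask.length : Int) - 1) mask 0, hmap, List.foldl_map]
  simp [PySem.List.len_eq]

theorem portB_eq_outB (mask : List Bool) :
    getSideOfAngleRange_alt mask = outB ((mask.length : Int) - 1) mask 0 ([], none) := by
  unfold getSideOfAngleRange_alt outB
  rw [foldlB_eq_goB]

-- ===== VERDICT (by name: the statement is the Claim_ definition above) =====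
theorem getSideOfAngleRange_spec : Claim_equal_getSideOfAngleRange := by
  intro mask _
  unfold Spec_getSideOfAngleRange
  rw [portA_eq_outA, portB_eq_outB]
  exact lem0 mask 0 ((mask.length : Int) - 1) (by omega)
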